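-- pv_equiv track=rewrite | github.com/cheeze2000/aoc2021 | src/06b.py | f
-- ===== SOURCE A (Python) =====
-- def f(xs):
-- 	ys = [0] * 9
-- 	for i in range(9):
-- 		if i > 0:
-- 			ys[i - 1] += xs[i]
-- 		else:
-- 			ys[6] += xs[0]
-- 			ys[8] += xs[0]
--
-- 	return ys
-- ===== SOURCE B (Python) =====
-- def f(xs):
-- 	return xs[1:7] + [xs[7] + xs[0], xs[8], xs[0]]
-- ===== Notes on version B (the rewrite author's own statement) =====
-- stated objective: simpler
-- what changed: Replaces the 9-iteration loop over an accumulator array with a direct closed-form construction: a slice xs[1:7] for the shifted buckets plus explicit literals for buckets 6, 7, 8.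
import Mathlib
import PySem

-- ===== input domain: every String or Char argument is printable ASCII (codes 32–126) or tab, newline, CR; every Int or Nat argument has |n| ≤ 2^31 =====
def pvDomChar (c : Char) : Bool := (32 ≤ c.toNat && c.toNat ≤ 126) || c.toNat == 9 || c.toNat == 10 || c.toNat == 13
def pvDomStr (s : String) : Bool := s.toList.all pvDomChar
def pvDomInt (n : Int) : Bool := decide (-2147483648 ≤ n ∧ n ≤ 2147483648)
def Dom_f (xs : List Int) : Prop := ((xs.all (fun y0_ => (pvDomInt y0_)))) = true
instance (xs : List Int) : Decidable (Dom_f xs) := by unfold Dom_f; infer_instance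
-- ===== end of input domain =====

-- B replaces A's 9-step loop over an accumulator array with a closed-form
-- slice-plus-literals construction (objective: simpler).

-- ===== PORT A =====
-- the loop body: ys has fixed length 9, indices into ys are always in range;
-- xs is indexed with pyGetD (exact under Pre_f, which guarantees 9 ≤ xs.length,
-- exactly where the Python returns without IndexError)
def f (xs : List Int) : List Int :=
  (PySem.List.pyRange 0 9 1).foldl
    (fun ys i =>
      if i > 0 then
        ys.set (i - 1).toNat (ys.getD (i - 1).toNat 0 + PySem.List.pyGetD xs i 0)
      else
        ((ys.set 6 (ys.getD 6 0 + PySem.List.pyGetD xs 0 0)).set 8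
          ((ys.set 6 (ys.getD 6 0 + PySem.List.pyGetD xs 0 0)).getD 8 0 + PySem.List.pyGetD xs 0 0)))
    (List.replicate 9 0)

-- ===== PORT B =====
def f_alt (xs : List Int) : List Int :=
  PySem.List.slice xs (some 1) (some 7) ++
    [PySem.List.pyGetD xs 7 0 + PySem.List.pyGetD xs 0 0,
     PySem.List.pyGetD xs 8 0,
     PySem.List.pyGetD xs 0 0]

-- ===== PRECONDITION & SPEC =====
-- Pre_f: exactly the inputs where Python A returns (both A and B raise IndexError when len(xs) < 9)
def Pre_f (xs : List Int) : Prop := 9 ≤ xs.length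
instance (xs : List Int) : Decidable (Pre_f xs) := by unfold Pre_f; infer_instance
def pvWitness_f : List Int := [1, 2, 3, 4, 5, 6, 7, 8, 9]
def Spec_f (xs : List Int) (out : List Int) : Prop := out = f_alt xs
instance (xs : List Int) (out : List Int) : Decidable (Spec_f xs out) := by unfold Spec_f; infer_instance

-- ===== CLAIM (what is proved, stated in full; the proofs are below) =====
def Claim_equal_f : Prop := ∀ (xs : List Int), Dom_f xs → Pre_f xs → Spec_f xs (f xs)

-- ===== LEMMAS AND PROOFS =====

-- ===== VERDICT (by name: the statement is the Claim_ definition above) =====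
theorem f_spec : Claim_equal_f := by
  intro xs _ hpre
  unfold Pre_f at hpre
  match xs, hpre with
  | a0 :: a1 :: a2 :: a3 :: a4 :: a5 :: a6 :: a7 :: a8 :: rest, _ =>
    show f _ = f_alt _
    have hr : PySem.List.pyRange 0 9 1 = [0, 1, 2, 3, 4, 5, 6, 7, 8] := by decide
    have hs : PySem.List.slice (a0 :: a1 :: a2 :: a3 :: a4 :: a5 :: a6 :: a7 :: a8 :: rest)
        (some 1) (some 7) = [a1, a2, a3, a4, a5, a6] := by
      simp [PySem.List.slice]
    simp [f, f_alt, hr, List.foldl, PySem.List.pyGetD_ofNat', hs, Int.add_comm a0 a7]
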